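-- pv_equiv track=rewrite | github.com/odoo3w/odoorpc2 | odoorpc2/fields.py | merge_tuples_one
-- ===== SOURCE A (Python) =====
-- def merge_tuples_one(old_tuples, tuple_in):
--     if tuple_in[0] in [6, 5]:
--         # for 2m2, new=6,5, old=any
--         return [tuple_in]
--
--     to_append = tuple_in
--     newval = tuple_in
--
--     temp = []
--     for oldval in old_tuples:
--         if oldval[0] in [6, 5]:
--             # 1st, new=4,3,2,1,0, old=6,5
--             temp.append(oldval)
--             to_append = newval
--         elif newval[1] != oldval[1]:
--             # 2nd, new=4,3,2,1,0, old=4,3,2,1,0, id not equ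
--             temp.append(oldval)
--             # to_append = newval
--
--         # id equ.
--         elif oldval[0] == 0:
--             if newval[0] == 0:
--                 # 3rd, new=0, old=0, id equ  # new update
--                 to_append = newval
--             elif newval[0] in [2, 3]:
--                 # 4th, new line then delete, # this a extend for odoo
--                 to_append = None
--             else:
--                 # 5th, never goto here
--                 to_append = None
--         elif oldval[0] in [1, 4]:
--             if newval[0] in (1, 2, 3):
--                 # 6th, old line , then edit or del
--                 to_append = newval
--             elif newval[0] == 4:
--                 # 7th, few goto here. old then add.
--                 to_append = oldval
--             else:
--                 # 8th, never goto here. old then ...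
--                 to_append = None
--
--         elif oldval[0] in [2, 3]:
--             if newval[0] == 4:
--                 # 9th, del then add
--                 to_append = newval
--             else:
--                 # 10th, never goto here. old=2,3 new=1,2,3. del then del, edit
--                 to_append = oldval
--         else:  # never goto here
--             # to_append = newval
--             pass
--
--     if to_append:
--         temp.append(to_append)
--
--     return temp
-- ===== SOURCE B (Python) =====
-- def merge_tuples_one(old_tuples, tuple_in):
--     if tuple_in[0] in (6, 5):
--         return [tuple_in]
--
--     temp = [o for o in old_tuples if o[0] in (6, 5) or o[1] != tuple_in[1]]
--
--     to_append = tuple_in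
--     for o in reversed(old_tuples):
--         if o[0] in (6, 5):
--             to_append = tuple_in
--             break
--         if o[1] == tuple_in[1] and o[0] in (0, 1, 2, 3, 4):
--             to_append = _merge_rule(o, tuple_in)
--             break
--
--     if to_append:
--         temp.append(to_append)
--     return temp
--
--
-- def _merge_rule(o, newval):
--     if o[0] == 0:
--         return newval if newval[0] == 0 else None
--     if o[0] in (1, 4):
--         if newval[0] in (1, 2, 3):
--             return newval
--         return o if newval[0] == 4 else None
--     # o[0] in (2, 3)
--     return newval if newval[0] == 4 else o
-- ===== Notes on version B (the rewrite author's own statement) =====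
-- stated objective: simpler
-- what changed: Replaces A's single stateful loop (mutating temp and to_append together through a nine-branch cascade) by a filter comprehension for temp plus one reverse scan with early break that finds the last relevant command and computes the appended tuple in closed form.
import Mathlib
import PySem

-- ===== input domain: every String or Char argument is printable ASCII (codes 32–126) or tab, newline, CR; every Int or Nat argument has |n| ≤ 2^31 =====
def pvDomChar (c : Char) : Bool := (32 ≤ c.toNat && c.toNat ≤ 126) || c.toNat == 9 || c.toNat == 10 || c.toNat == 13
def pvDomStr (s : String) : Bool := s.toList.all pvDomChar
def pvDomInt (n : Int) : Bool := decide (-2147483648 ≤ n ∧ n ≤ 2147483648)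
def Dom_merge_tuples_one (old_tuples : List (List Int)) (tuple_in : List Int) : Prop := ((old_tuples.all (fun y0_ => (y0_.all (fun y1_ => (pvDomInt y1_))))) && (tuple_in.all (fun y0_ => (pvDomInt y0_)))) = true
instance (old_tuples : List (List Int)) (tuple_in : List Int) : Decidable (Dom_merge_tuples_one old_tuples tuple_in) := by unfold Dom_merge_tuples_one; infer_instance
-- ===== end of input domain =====

-- B replaces A's single stateful loop by a filter comprehension plus one reverse scan for the
-- last relevant command, computing the appended tuple in closed form (objective: simpler).
-- ===== PORT A =====
-- one step of A's for-loop; state = (temp, to_append); indices 0/1 are valid inside Pre_, ported with getD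
def mergeStepA (newval : List Int) (st : List (List Int) × Option (List Int)) (oldval : List Int) :
    List (List Int) × Option (List Int) :=
  let temp := st.1
  let ta := st.2
  if oldval.getD 0 0 = 6 ∨ oldval.getD 0 0 = 5 then
    (temp ++ [oldval], some newval)
  else if newval.getD 1 0 ≠ oldval.getD 1 0 then
    (temp ++ [oldval], ta)
  else if oldval.getD 0 0 = 0 then
    (if newval.getD 0 0 = 0 then (temp, some newval)
     else if newval.getD 0 0 = 2 ∨ newval.getD 0 0 = 3 then (temp, none)
     else (temp, none))
  else if oldval.getD 0 0 = 1 ∨ oldval.getD 0 0 = 4 then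
    (if newval.getD 0 0 = 1 ∨ newval.getD 0 0 = 2 ∨ newval.getD 0 0 = 3 then (temp, some newval)
     else if newval.getD 0 0 = 4 then (temp, some oldval)
     else (temp, none))
  else if oldval.getD 0 0 = 2 ∨ oldval.getD 0 0 = 3 then
    (if newval.getD 0 0 = 4 then (temp, some newval) else (temp, some oldval))
  else
    (temp, ta)

def merge_tuples_one (old_tuples : List (List Int)) (tuple_in : List Int) : List (List Int) :=
  if tuple_in.getD 0 0 = 6 ∨ tuple_in.getD 0 0 = 5 then [tuple_in]
  else
    let st := old_tuples.foldl (mergeStepA tuple_in) ([], some tuple_in)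
    match st.2 with
    | some l => if l.isEmpty then st.1 else st.1 ++ [l]   -- Python truthiness of a list
    | none => st.1

-- ===== PORT B =====
def mergeRuleB (o newval : List Int) : Option (List Int) :=
  if o.getD 0 0 = 0 then
    (if newval.getD 0 0 = 0 then some newval else none)
  else if o.getD 0 0 = 1 ∨ o.getD 0 0 = 4 then
    (if newval.getD 0 0 = 1 ∨ newval.getD 0 0 = 2 ∨ newval.getD 0 0 = 3 then some newval
     else if newval.getD 0 0 = 4 then some o else none)
  else
    (if newval.getD 0 0 = 4 then some newval else some o)

-- the comprehension's keep-condition and the reverse scan's relevance condition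
def keepB (newval o : List Int) : Bool :=
  (o.getD 0 0 == 6 || o.getD 0 0 == 5) || o.getD 1 0 != newval.getD 1 0

def relB (newval o : List Int) : Bool :=
  (o.getD 0 0 == 6 || o.getD 0 0 == 5) ||
  (o.getD 1 0 == newval.getD 1 0 &&
    (o.getD 0 0 == 0 || o.getD 0 0 == 1 || o.getD 0 0 == 2 || o.getD 0 0 == 3 || o.getD 0 0 == 4))

-- Source B's reversed-loop-with-break = first match in the reversed list
def lastRelevantB (old_tuples : List (List Int)) (tuple_in : List Int) : Option (List Int) :=
  match old_tuples.reverse.find? (relB tuple_in) with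
  | none => some tuple_in
  | some o =>
      if o.getD 0 0 = 6 ∨ o.getD 0 0 = 5 then some tuple_in
      else mergeRuleB o tuple_in

def merge_tuples_one_alt (old_tuples : List (List Int)) (tuple_in : List Int) : List (List Int) :=
  if tuple_in.getD 0 0 = 6 ∨ tuple_in.getD 0 0 = 5 then [tuple_in]
  else
    let temp := old_tuples.filter (keepB tuple_in)
    match lastRelevantB old_tuples tuple_in with
    | some l => if l.isEmpty then temp else temp ++ [l]   -- Python truthiness of a list
    | none => temp

-- ===== PRECONDITION & SPEC =====
-- Pre_ excludes exactly the inputs where Python A raises IndexError: tuple_in empty, or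
-- (when tuple_in's command is not 6/5) some oldval empty, or an id index 1 missing on a
-- compared pair.
def Pre_merge_tuples_one (old_tuples : List (List Int)) (tuple_in : List Int) : Prop :=
  tuple_in ≠ [] ∧
  ((tuple_in.getD 0 0 = 6 ∨ tuple_in.getD 0 0 = 5) ∨
    ∀ o ∈ old_tuples, o ≠ [] ∧
      ((o.getD 0 0 ≠ 6 ∧ o.getD 0 0 ≠ 5) → 2 ≤ o.length ∧ 2 ≤ tuple_in.length))
instance (old_tuples : List (List Int)) (tuple_in : List Int) : Decidable (Pre_merge_tuples_one old_tuples tuple_in) := by unfold Pre_merge_tuples_one; infer_instance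

def pvWitness_merge_tuples_one : List (List Int) × List Int := ([[0, 7], [4, 3, 9]], [2, 3])

def Spec_merge_tuples_one (old_tuples : List (List Int)) (tuple_in : List Int) (out : List (List Int)) : Prop := out = merge_tuples_one_alt old_tuples tuple_in
instance (old_tuples : List (List Int)) (tuple_in : List Int) (out : List (List Int)) : Decidable (Spec_merge_tuples_one old_tuples tuple_in out) := by unfold Spec_merge_tuples_one; infer_instance

-- ===== CLAIM (what is proved, stated in full; the proofs are below) =====
def Claim_equal_merge_tuples_one : Prop := ∀ (old_tuples : List (List Int)) (tuple_in : List Int), Dom_merge_tuples_one old_tuples tuple_in → Pre_merge_tuples_one old_tuples tuple_in → Spec_merge_tuples_one old_tuples tuple_in (merge_tuples_one old_tuples tuple_in)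

-- ===== LEMMAS AND PROOFS =====
-- what B appends for a relevant oldval, as a function (B's last two branches combined)
def resolveB (newval o : List Int) : Option (List Int) :=
  if o.getD 0 0 = 6 ∨ o.getD 0 0 = 5 then some newval else mergeRuleB o newval

-- one step of A, in terms of keepB/relB/resolveB
theorem mergeStepA_eq (newval : List Int) (temp : List (List Int)) (ta : Option (List Int))
    (o : List Int) :
    mergeStepA newval (temp, ta) o =
      (temp ++ (if keepB newval o then [o] else []),
       if relB newval o then resolveB newval o else ta) := by
  simp only [mergeStepA, keepB, relB, resolveB, mergeRuleB, Bool.or_eq_true, Bool.and_eq_true,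
    beq_iff_eq, bne_iff_ne]
  split_ifs <;> simp_all

-- the loop of A, characterized: temp accumulates the kept tuples, to_append is decided
-- by the last relevant tuple (if any)
theorem foldA_eq (newval : List Int) (l : List (List Int)) :
    ∀ (temp : List (List Int)) (ta : Option (List Int)),
      l.foldl (mergeStepA newval) (temp, ta) =
        (temp ++ l.filter (keepB newval),
         match l.reverse.find? (relB newval) with
         | none => ta
         | some o => resolveB newval o) := by
  induction l with
  | nil => intro temp ta; simp
  | cons o rest ih =>
      intro temp ta
      simp only [List.foldl_cons, mergeStepA_eq, List.reverse_cons, List.find?_append]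
      rw [ih]
      by_cases hr : relB newval o
      · by_cases hk : keepB newval o <;>
          · simp [hr, hk, Option.or]
            cases rest.reverse.find? (relB newval) <;> simp
      · have hr' : ¬ (relB newval o = true) := by simpa using hr
        by_cases hk : keepB newval o <;>
          · simp [hk, Option.or, hr']
            cases rest.reverse.find? (relB newval) <;> simp

-- ===== VERDICT (by name: the statement is the Claim_ definition above) =====
theorem merge_tuples_one_spec : Claim_equal_merge_tuples_one := by
  intro old_tuples tuple_in _ _
  unfold Spec_merge_tuples_one merge_tuples_one merge_tuples_one_alt lastRelevantB
  by_cases h : tuple_in.getD 0 0 = 6 ∨ tuple_in.getD 0 0 = 5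
  · rw [if_pos h, if_pos h]
  · rw [if_neg h, if_neg h]
    rw [foldA_eq]
    cases old_tuples.reverse.find? (relB tuple_in) with
    | none => simp
    | some o => simp [resolveB]
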